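-- pv_equiv track=rewrite | github.com/Juan-Calixto-UNP/Django_Initial_project | Services/formato_desplazamiento_rendering.py | mapear_datos_tiquetes_ida_regreso
-- ===== SOURCE A (Python) =====
-- def mapear_datos_tiquetes_ida_regreso(servicios:list):
--     '''Mapea los vuelos IDA y REGRESO desde TODOS los servicios (sin duplicados)
--     Args:
--         servicios: lista completa de servicios
--     Returns:
--         dict: diccionario con solo ida y regreso
--     '''
--     # Estructura base para ida y regreso
--     resultado = {
--         'ida': {
--             'fecha': '',
--             'hora': '',
--             'origen': '',
--             'destino': '',
--             'aerolinea': '',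
--             'vuelo': '',
--             'tipo': 'Ida'
--         },
--         'regreso': {
--             'fecha': '',
--             'hora': '',
--             'origen': '',
--             'destino': '',
--             'aerolinea': '',
--             'vuelo': '',
--             'tipo': 'Regreso'
--         }
--     }
--
--     # Buscar y asignar IDA y REGRESO de los servicios
--     for servicio in servicios:
--         vuelos = servicio.get('vuelos', [])
--         for vuelo in vuelos:
--             tipo = vuelo.get('tipo', '')
--             if tipo == 'Ida' and not resultado['ida']['vuelo']:
--                 resultado['ida'] = {
--                     'fecha': vuelo.get('fecha_vuelo', ''),
--                     'hora': vuelo.get('hora_vuelo', ''),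
--                     'origen': vuelo.get('origen', ''),
--                     'destino': vuelo.get('destino', ''),
--                     'aerolinea': vuelo.get('aerolinea', ''),
--                     'vuelo': vuelo.get('numero_vuelo', ''),
--                     'tipo': 'Ida'
--                 }
--             elif tipo == 'Regreso' and not resultado['regreso']['vuelo']:
--                 resultado['regreso'] = {
--                     'fecha': vuelo.get('fecha_vuelo', ''),
--                     'hora': vuelo.get('hora_vuelo', ''),
--                     'origen': vuelo.get('origen', ''),
--                     'destino': vuelo.get('destino', ''),
--                     'aerolinea': vuelo.get('aerolinea', ''),
--                     'vuelo': vuelo.get('numero_vuelo', ''),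
--                     'tipo': 'Regreso'
--                 }
--
--     return resultado
-- ===== SOURCE B (Python) =====
-- def mapear_datos_tiquetes_ida_regreso(servicios: list):
--     '''Mapea los vuelos IDA y REGRESO desde TODOS los servicios (sin duplicados)'''
--     flat = [v for s in servicios for v in s.get('vuelos', [])]
--
--     def map_vuelo(v, tipo):
--         return {
--             'fecha': v.get('fecha_vuelo', ''),
--             'hora': v.get('hora_vuelo', ''),
--             'origen': v.get('origen', ''),
--             'destino': v.get('destino', ''),
--             'aerolinea': v.get('aerolinea', ''),
--             'vuelo': v.get('numero_vuelo', ''),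
--             'tipo': tipo,
--         }
--
--     def pick(tipo):
--         sel = {'fecha': '', 'hora': '', 'origen': '', 'destino': '',
--                'aerolinea': '', 'vuelo': '', 'tipo': tipo}
--         for v in flat:
--             if v.get('tipo', '') == tipo and not sel['vuelo']:
--                 sel = map_vuelo(v, tipo)
--         return sel
--
--     return {'ida': pick('Ida'), 'regreso': pick('Regreso')}
-- ===== Notes on version B (the rewrite author's own statement) =====
-- stated objective: simpler
-- what changed: Replaces A's nested loops with one interleaved (ida, regreso) state by flattening all flights once and selecting each leg with its own independent single pass (reassign while the selected 'vuelo' is still empty).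
import Mathlib
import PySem

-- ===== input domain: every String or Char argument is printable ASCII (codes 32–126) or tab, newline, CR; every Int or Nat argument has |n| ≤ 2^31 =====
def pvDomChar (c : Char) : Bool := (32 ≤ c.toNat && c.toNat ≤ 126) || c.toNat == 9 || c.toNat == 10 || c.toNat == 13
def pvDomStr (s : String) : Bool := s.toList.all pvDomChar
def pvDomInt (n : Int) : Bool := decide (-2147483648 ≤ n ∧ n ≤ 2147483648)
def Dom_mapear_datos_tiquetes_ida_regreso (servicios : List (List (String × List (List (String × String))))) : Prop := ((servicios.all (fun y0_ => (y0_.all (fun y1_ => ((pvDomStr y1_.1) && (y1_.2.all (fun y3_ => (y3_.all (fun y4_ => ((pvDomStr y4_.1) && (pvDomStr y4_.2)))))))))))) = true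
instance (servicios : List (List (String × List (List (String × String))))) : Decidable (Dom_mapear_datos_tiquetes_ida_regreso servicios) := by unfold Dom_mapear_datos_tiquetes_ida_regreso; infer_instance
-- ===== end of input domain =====

-- B re-implements A by a different decomposition: flatten all flights once, then select
-- each leg (Ida / Regreso) with an independent single pass; same return value (objective: simpler).

-- shared primitive: Python's d.get(k, dflt) on an association list (first match)
def pvLookupD {β : Type} (d : List (String × β)) (k : String) (dflt : β) : β :=
  match d with
  | [] => dflt
  | (k', v) :: rest => if k' = k then v else pvLookupD rest k dflt

-- ===== PORT A =====
-- the base dict A builds for each leg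
def pvBaseLeg (tipo : String) : List (String × String) :=
  [("fecha", ""), ("hora", ""), ("origen", ""), ("destino", ""), ("aerolinea", ""), ("vuelo", ""), ("tipo", tipo)]

-- the dict A assigns from a flight (same literal keys/order as the Python dict display)
def pvMapVuelo (vuelo : List (String × String)) (tipo : String) : List (String × String) :=
  [("fecha", pvLookupD vuelo "fecha_vuelo" ""), ("hora", pvLookupD vuelo "hora_vuelo" ""),
   ("origen", pvLookupD vuelo "origen" ""), ("destino", pvLookupD vuelo "destino" ""),
   ("aerolinea", pvLookupD vuelo "aerolinea" ""), ("vuelo", pvLookupD vuelo "numero_vuelo" ""),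
   ("tipo", tipo)]

-- literal port of A: nested loops over servicios/vuelos, one interleaved (ida, regreso) state.
-- resultado['ida']['vuelo'] is direct indexing, ported as pvLookupD …; exact since the key
-- "vuelo" is present in every dict A stores there; 'not s' on a string is s = "".
def mapear_datos_tiquetes_ida_regreso (servicios : List (List (String × List (List (String × String))))) : List (String × List (String × String)) :=
  let resultado := servicios.foldl
    (fun st servicio =>
      let vuelos := pvLookupD servicio "vuelos" []
      vuelos.foldl
        (fun (st : List (String × String) × List (String × String)) vuelo =>
          let tipo := pvLookupD vuelo "tipo" ""
          if tipo = "Ida" ∧ pvLookupD st.1 "vuelo" "" = "" then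
            (pvMapVuelo vuelo "Ida", st.2)
          else if tipo = "Regreso" ∧ pvLookupD st.2 "vuelo" "" = "" then
            (st.1, pvMapVuelo vuelo "Regreso")
          else st)
        st)
    (pvBaseLeg "Ida", pvBaseLeg "Regreso")
  [("ida", resultado.1), ("regreso", resultado.2)]

-- ===== PORT B =====
-- B's pick(tipo): one pass over the flat flight list, reassigning while 'vuelo' is still falsy
def pvPick (flat : List (List (String × String))) (tipo : String) : List (String × String) :=
  flat.foldl
    (fun sel vuelo =>
      if pvLookupD vuelo "tipo" "" = tipo ∧ pvLookupD sel "vuelo" "" = "" then pvMapVuelo vuelo tipo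
      else sel)
    (pvBaseLeg tipo)

def mapear_datos_tiquetes_ida_regreso_alt (servicios : List (List (String × List (List (String × String))))) : List (String × List (String × String)) :=
  let flat := servicios.flatMap (fun s => pvLookupD s "vuelos" [])
  [("ida", pvPick flat "Ida"), ("regreso", pvPick flat "Regreso")]

-- ===== PRECONDITION & SPEC =====
def Spec_mapear_datos_tiquetes_ida_regreso (servicios : List (List (String × List (List (String × String))))) (out : List (String × List (String × String))) : Prop := out = mapear_datos_tiquetes_ida_regreso_alt servicios
instance (servicios : List (List (String × List (List (String × String))))) (out : List (String × List (String × String))) : Decidable (Spec_mapear_datos_tiquetes_ida_regreso servicios out) := by unfold Spec_mapear_datos_tiquetes_ida_regreso; infer_instance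

-- ===== CLAIM (what is proved, stated in full; the proofs are below) =====
def Claim_equal_mapear_datos_tiquetes_ida_regreso : Prop := ∀ (servicios : List (List (String × List (List (String × String))))), Dom_mapear_datos_tiquetes_ida_regreso servicios → Spec_mapear_datos_tiquetes_ida_regreso servicios (mapear_datos_tiquetes_ida_regreso servicios)

-- ===== LEMMAS AND PROOFS =====

-- B's per-leg step functions, named so the pair-splitting lemma applies
def pvStepIda (sel : List (String × String)) (vuelo : List (String × String)) : List (String × String) :=
  if pvLookupD vuelo "tipo" "" = "Ida" ∧ pvLookupD sel "vuelo" "" = "" then pvMapVuelo vuelo "Ida" else sel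

def pvStepReg (sel : List (String × String)) (vuelo : List (String × String)) : List (String × String) :=
  if pvLookupD vuelo "tipo" "" = "Regreso" ∧ pvLookupD sel "vuelo" "" = "" then pvMapVuelo vuelo "Regreso" else sel

-- A's interleaved step acts componentwise: the Ida branch never touches the Regreso slot and vice versa
theorem pvStep_prod (st : List (String × String) × List (String × String)) (vuelo : List (String × String)) :
    (if pvLookupD vuelo "tipo" "" = "Ida" ∧ pvLookupD st.1 "vuelo" "" = "" then
        (pvMapVuelo vuelo "Ida", st.2)
      else if pvLookupD vuelo "tipo" "" = "Regreso" ∧ pvLookupD st.2 "vuelo" "" = "" then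
        (st.1, pvMapVuelo vuelo "Regreso")
      else st)
    = (pvStepIda st.1 vuelo, pvStepReg st.2 vuelo) := by
  unfold pvStepIda pvStepReg
  by_cases h : pvLookupD vuelo "tipo" "" = "Ida" <;> simp [h] <;> split_ifs <;> simp_all

-- folding over the concatenation of the inner lists = the nested double fold
theorem foldl_flatMap_eq {α β σ : Type} (l : List α) (f : α → List β) (g : σ → β → σ) (i : σ) :
    (l.flatMap f).foldl g i = l.foldl (fun a s => (f s).foldl g a) i := by
  induction l generalizing i with
  | nil => rfl
  | cons h t ih => simp [List.foldl_append, ih]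

-- ===== VERDICT (by name: the statement is the Claim_ definition above) =====
theorem mapear_datos_tiquetes_ida_regreso_spec : Claim_equal_mapear_datos_tiquetes_ida_regreso := by
  intro servicios _
  unfold Spec_mapear_datos_tiquetes_ida_regreso mapear_datos_tiquetes_ida_regreso
    mapear_datos_tiquetes_ida_regreso_alt pvPick
  simp only [pvStep_prod, ← foldl_flatMap_eq, PySem.List.foldl_prod_mk]
  rfl
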